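-- pv_equiv track=rewrite | github.com/chipi/podcast_scraper | tools/run_compare/data.py | _fit_tail_path_to_width
-- ===== SOURCE A (Python) =====
-- from typing import Any, Dict, Iterable, List, Optional, Sequence, Tuple
--
-- def _fit_tail_path_to_width(parts: Sequence[str], max_chars: int) -> str:
--     """Keep path tail; drop whole segments from the left, then hard-clip the leaf."""
--     if not parts:
--         return ""
--     for k in range(len(parts), 0, -1):
--         chunk = "/".join(parts[-k:])
--         if len(chunk) <= max_chars:
--             return chunk
--     leaf = parts[-1]
--     return leaf[-max_chars:] if len(leaf) > max_chars else leaf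
-- ===== SOURCE B (Python) =====
-- def _fit_tail_path_to_width(parts, max_chars):
--     """Keep path tail; drop whole segments from the left, then hard-clip the leaf.
--
--     One right-to-left pass accumulating joined-suffix length (no repeated joins):
--     counts the largest k whose joined tail fits, then does a single join.
--     """
--     if not parts:
--         return ""
--     total = -1  # joined length of last k segments is sum(len)+k-1
--     k = 0
--     for p in reversed(parts):
--         total += len(p) + 1
--         if total > max_chars:
--             break
--         k += 1
--     if k:
--         return "/".join(parts[len(parts) - k:])
--     return parts[-1][-max_chars:]
-- ===== Notes on version B (the rewrite author's own statement) =====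
-- stated objective: faster
-- what changed: Replaces the descending loop that re-joins the whole suffix at every k (O(n^2) characters) with a single right-to-left pass accumulating the joined-suffix length to find the largest fitting k, followed by one join.
import Mathlib
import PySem

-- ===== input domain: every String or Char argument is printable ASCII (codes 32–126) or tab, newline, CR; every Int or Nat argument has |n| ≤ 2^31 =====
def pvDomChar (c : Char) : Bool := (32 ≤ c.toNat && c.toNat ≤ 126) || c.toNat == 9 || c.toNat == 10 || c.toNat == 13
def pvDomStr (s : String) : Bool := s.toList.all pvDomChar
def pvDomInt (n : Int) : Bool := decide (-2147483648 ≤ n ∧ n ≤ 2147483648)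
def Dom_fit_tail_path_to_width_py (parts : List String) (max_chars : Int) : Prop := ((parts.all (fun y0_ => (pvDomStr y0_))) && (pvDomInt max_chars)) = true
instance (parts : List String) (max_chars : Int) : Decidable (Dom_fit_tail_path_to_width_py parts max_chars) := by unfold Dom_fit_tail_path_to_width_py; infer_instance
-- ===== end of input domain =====

-- B replaces A's descending re-join-per-k scan by one right-to-left length-accumulating
-- pass that counts the largest fitting suffix, then a single join (objective: faster).

-- ===== PORT A =====
-- for k in range(len(parts), 0, -1): chunk = "/".join(parts[-k:]); if len(chunk) <= max_chars: return chunk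
def fitA_loop (parts : List String) (max_chars : Int) : Nat → Option String
  | 0 => none
  | k + 1 =>
      let chunk := PySem.Str.join "/" (PySem.List.slice parts (some (-((k + 1 : Nat) : Int))) none)
      if PySem.Str.len chunk ≤ max_chars then some chunk else fitA_loop parts max_chars k

def fit_tail_path_to_width_py (parts : List String) (max_chars : Int) : String :=
  if parts = [] then ""
  else
    match fitA_loop parts max_chars parts.length with
    | some chunk => chunk
    | none =>
        let leaf := (PySem.List.pyGet? parts (-1)).getD ""
        if max_chars < PySem.Str.len leaf then PySem.Str.slice leaf (some (-max_chars)) none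
        else leaf

-- ===== PORT B =====
-- the for-loop over reversed(parts) with break: counts segments while the running
-- joined length (total starts at -1) stays within max_chars
def fitB_count (max_chars : Int) : List String → Int → Nat
  | [], _ => 0
  | p :: rest, total =>
      let t := total + PySem.Str.len p + 1
      if max_chars < t then 0 else fitB_count max_chars rest t + 1

def fit_tail_path_to_width_py_alt (parts : List String) (max_chars : Int) : String :=
  if parts = [] then ""
  else
    let k := fitB_count max_chars parts.reverse (-1)
    if k ≠ 0 then
      PySem.Str.join "/" (PySem.List.slice parts (some ((parts.length : Int) - (k : Int))) none)
    else
      PySem.Str.slice ((PySem.List.pyGet? parts (-1)).getD "") (some (-max_chars)) none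

-- ===== PRECONDITION & SPEC =====
def Spec_fit_tail_path_to_width_py (parts : List String) (max_chars : Int) (out : String) : Prop := out = fit_tail_path_to_width_py_alt parts max_chars
instance (parts : List String) (max_chars : Int) (out : String) : Decidable (Spec_fit_tail_path_to_width_py parts max_chars out) := by unfold Spec_fit_tail_path_to_width_py; infer_instance

-- ===== CLAIM (what is proved, stated in full; the proofs are below) =====
def Claim_equal_fit_tail_path_to_width_py : Prop := ∀ (parts : List String) (max_chars : Int), Dom_fit_tail_path_to_width_py parts max_chars → Spec_fit_tail_path_to_width_py parts max_chars (fit_tail_path_to_width_py parts max_chars)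

-- ===== LEMMAS AND PROOFS =====

-- fitS r j = joined length + 1 of the first j segments of r: sum of (len p + 1)
def fitS : List String → Nat → Int
  | _, 0 => 0
  | [], _ + 1 => 0
  | p :: rest, j + 1 => PySem.Str.len p + 1 + fitS rest j

theorem str_len_nonneg (s : String) : 0 ≤ PySem.Str.len s := by
  rw [PySem.Str.len_eq]; positivity

theorem fitS_succ : ∀ (r : List String) (k : Nat) (h : k < r.length),
    fitS r (k + 1) = fitS r k + PySem.Str.len (r.get ⟨k, h⟩) + 1 := by
  intro r
  induction r with
  | nil => intro k h; simp at h
  | cons p rest ih =>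
      intro k h
      cases k with
      | zero => simp [fitS]
      | succ j =>
          have hj : j < rest.length := by simpa using h
          simp only [fitS, ih j hj, List.get_cons_succ]
          ring

theorem fitS_mono : ∀ (r : List String) (i j : Nat), i ≤ j → j ≤ r.length →
    fitS r i ≤ fitS r j := by
  intro r i j hij hj
  induction j with
  | zero =>
      have : i = 0 := by omega
      simp [this]
  | succ m ih =>
      rcases Nat.eq_or_lt_of_le hij with h | h
      · rw [h]
      · have hm : i ≤ m := by omega
        have hml : m < r.length := by omega
        have := ih hm (by omega)
        have hstep := fitS_succ r m hml
        have := str_len_nonneg (r.get ⟨m, hml⟩)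
        omega

theorem len_join_cons (x : String) (l : List String) (h : l ≠ []) :
    PySem.Str.len (PySem.Str.join "/" (x :: l)) =
      PySem.Str.len x + 1 + PySem.Str.len (PySem.Str.join "/" l) := by
  obtain ⟨b, t, rfl⟩ := List.exists_cons_of_ne_nil h
  have hsep : ("/" : String).toList = ['/'] := rfl
  simp only [PySem.Str.len_eq, PySem.Str.toList_join, List.map_cons, hsep,
    PySem.Chars.join_cons_cons, List.length_append, List.length_cons, List.length_nil]
  push_cast
  ring

theorem join_singleton_str (p : String) : PySem.Str.join "/" [p] = p := by
  apply String.toList_injective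
  rw [PySem.Str.toList_join, List.map_cons, List.map_nil,
    PySem.Chars.join_singleton]

-- joined length of the last k segments (as a reversed-take prefix) is fitS r k - 1
theorem join_len_take : ∀ (r : List String) (k : Nat), 1 ≤ k → k ≤ r.length →
    PySem.Str.len (PySem.Str.join "/" ((r.take k).reverse)) = fitS r k - 1 := by
  intro r k
  induction k with
  | zero => omega
  | succ j ih =>
      intro _ hle
      cases Nat.eq_zero_or_pos j with
      | inl hj0 =>
          subst hj0
          obtain ⟨p, rest, rfl⟩ := List.exists_cons_of_ne_nil
            (List.length_pos_iff.mp (by omega) : r ≠ [])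
          have h1 : List.take (0 + 1) (p :: rest) = [p] := by simp
          rw [h1]
          simp only [List.reverse_cons, List.reverse_nil, List.nil_append,
            join_singleton_str, fitS]
          ring
      | inr hj1 =>
          have hjl : j < r.length := by omega
          rw [List.take_add_one, List.getElem?_eq_getElem hjl]
          simp only [Option.toList_some, List.reverse_append, List.reverse_cons,
            List.reverse_nil, List.nil_append, List.cons_append]
          have hne : (r.take j).reverse ≠ [] := by
            have hlen : ((r.take j).reverse).length = j := by
              simp [List.length_take_of_le (le_of_lt hjl)]
            intro hx
            rw [hx] at hlen
            simp at hlen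
            omega
          rw [len_join_cons _ _ hne, ih hj1 (by omega), fitS_succ r j hjl]
          simp only [List.get_eq_getElem]
          ring

theorem fitB_count_le (max_chars : Int) : ∀ (r : List String) (t : Int),
    fitB_count max_chars r t ≤ r.length := by
  intro r
  induction r with
  | nil => intro t; simp [fitB_count]
  | cons p rest ih =>
      intro t
      simp only [fitB_count, List.length_cons]
      split
      · omega
      · exact Nat.succ_le_succ (ih _)

theorem fitB_count_fits (max_chars : Int) : ∀ (r : List String) (t : Int) (j : Nat),
    1 ≤ j → j ≤ fitB_count max_chars r t → t + fitS r j ≤ max_chars := by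
  intro r
  induction r with
  | nil => intro t j h1 h2; simp [fitB_count] at h2; omega
  | cons p rest ih =>
      intro t j h1 h2
      simp only [fitB_count] at h2
      split at h2
      · omega
      · rename_i hfit
        cases j with
        | zero => omega
        | succ i =>
            cases Nat.eq_zero_or_pos i with
            | inl hi0 =>
                subst hi0
                simp only [fitS]
                omega
            | inr hi1 =>
                have := ih (t + PySem.Str.len p + 1) i hi1 (by omega)
                simp only [fitS]
                omega

theorem fitB_count_lt (max_chars : Int) : ∀ (r : List String) (t : Int),
    fitB_count max_chars r t < r.length →
    max_chars < t + fitS r (fitB_count max_chars r t + 1) := by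
  intro r
  induction r with
  | nil => intro t h; simp [fitB_count] at h
  | cons p rest ih =>
      intro t h
      simp only [fitB_count, List.length_cons] at h ⊢
      split
      · rename_i hfit
        simp only [fitS]
        omega
      · rename_i hfit
        split at h
        · omega
        · have := ih (t + PySem.Str.len p + 1) (by omega)
          simp only [fitS]
          omega

theorem pyGet_neg_one {α : Type} (l : List α) (h : l ≠ []) :
    PySem.List.pyGet? l (-1) = some (l.getLast h) := by
  have hl : 0 < l.length := List.length_pos_iff.mpr h
  simp only [PySem.List.pyGet?, PySem.List.pyIdx?]
  rw [if_neg (by omega), if_pos (by exact_mod_cast by omega : -(l.length : Int) ≤ -1)]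
  simp only [Option.bind_some]
  norm_num
  rw [List.getElem?_eq_getElem (by omega)]
  congr 1
  exact (List.getLast_eq_getElem h).symm

theorem fitA_loop_char (parts : List String) (max_chars : Int) (c : Nat)
    (hfit : c ≠ 0 → PySem.Str.len (PySem.Str.join "/" (PySem.List.slice parts (some (-(c : Int))) none)) ≤ max_chars)
    (hnot : ∀ j : Nat, c < j → j ≤ parts.length →
      max_chars < PySem.Str.len (PySem.Str.join "/" (PySem.List.slice parts (some (-(j : Int))) none))) :
    ∀ k : Nat, c ≤ k → k ≤ parts.length →
      fitA_loop parts max_chars k =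
        if c = 0 then none
        else some (PySem.Str.join "/" (PySem.List.slice parts (some (-(c : Int))) none)) := by
  intro k
  induction k with
  | zero =>
      intro h1 _
      have hc0 : c = 0 := by omega
      simp [fitA_loop, hc0]
  | succ k ih =>
      intro h1 h2
      by_cases hc : c = k + 1
      · subst hc
        simp only [fitA_loop]
        rw [if_pos (hfit (by omega)), if_neg (by omega)]
      · have hck : c ≤ k := by omega
        simp only [fitA_loop]
        rw [if_neg (not_le.mpr (hnot (k + 1) (by omega) h2))]
        exact ih hck (by omega)

-- ===== VERDICT (by name: the statement is the Claim_ definition above) =====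
theorem fit_tail_path_to_width_py_spec : Claim_equal_fit_tail_path_to_width_py := by
  intro parts max_chars _
  unfold Spec_fit_tail_path_to_width_py
  by_cases hnil : parts = []
  · simp [fit_tail_path_to_width_py, fit_tail_path_to_width_py_alt, hnil]
  · have hn : 0 < parts.length := List.length_pos_iff.mpr hnil
    have hrlen : parts.reverse.length = parts.length := by simp
    set n := parts.length with hn_def
    set r := parts.reverse with hr_def
    set c := fitB_count max_chars r (-1) with hc_def
    have hcle : c ≤ n := hrlen ▸ fitB_count_le max_chars r (-1)
    have hslice : ∀ j : Nat, 0 < j →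
        PySem.List.slice parts (some (-(j : Int))) none = (r.take j).reverse := by
      intro j hj
      rw [PySem.List.slice_from_neg_natCast (xs := parts) (k := j) hj]
      rw [hr_def, List.take_reverse, List.reverse_reverse]
    have hlen : ∀ j : Nat, 1 ≤ j → j ≤ n →
        PySem.Str.len (PySem.Str.join "/" (PySem.List.slice parts (some (-(j : Int))) none))
          = fitS r j - 1 := by
      intro j h1 h2
      rw [hslice j h1, join_len_take r j h1 (by omega)]
    have hfit : c ≠ 0 →
        PySem.Str.len (PySem.Str.join "/" (PySem.List.slice parts (some (-(c : Int))) none)) ≤ max_chars := by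
      intro hc0
      rw [hlen c (by omega) hcle]
      have := fitB_count_fits max_chars r (-1) c (by omega) (le_refl _)
      omega
    have hnot : ∀ j : Nat, c < j → j ≤ n →
        max_chars < PySem.Str.len (PySem.Str.join "/" (PySem.List.slice parts (some (-(j : Int))) none)) := by
      intro j hcj hjn
      rw [hlen j (by omega) hjn]
      have h1 := fitB_count_lt max_chars r (-1) (by omega)
      rw [← hc_def] at h1
      have h2 := fitS_mono r (c + 1) j (by omega) (by omega)
      omega
    have hloop := fitA_loop_char parts max_chars c hfit hnot n hcle (le_refl _)
    simp only [fit_tail_path_to_width_py, fit_tail_path_to_width_py_alt, if_neg hnil]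
    rw [hloop]
    simp only [← hr_def, ← hc_def]
    by_cases hc0 : c = 0
    · rw [if_pos hc0]
      have hleaf1 : max_chars < PySem.Str.len ((PySem.List.pyGet? parts (-1)).getD "") := by
        have h1 := hnot 1 (by omega) (by omega)
        rw [hslice 1 (by omega)] at h1
        have ht1 : (r.take 1).reverse = [parts.getLast hnil] := by
          rw [hr_def, List.take_reverse, List.reverse_reverse,
            List.drop_length_sub_one hnil]
        rw [ht1, join_singleton_str] at h1
        rw [pyGet_neg_one parts hnil]
        exact h1
      rw [if_pos hleaf1, if_neg (by omega : ¬ c ≠ 0)]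
    · rw [if_neg hc0]
      have hcpos : 0 < c := by omega
      rw [hslice c hcpos]
      have hB : PySem.List.slice parts (some ((n : Int) - (c : Int))) none = (r.take c).reverse := by
        have hcast : (n : Int) - (c : Int) = ((n - c : Nat) : Int) := by
          push_cast [Nat.cast_sub hcle]; ring
        rw [hcast, PySem.List.slice_from_natCast]
        rw [hr_def, List.take_reverse, List.reverse_reverse]
      rw [hB, if_pos hc0]
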